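-- pv_equiv track=rewrite | github.com/onera/Cassiopee | Cassiopee/Post/Post/Probe.py | getFieldLoc
-- ===== SOURCE A (Python) =====
-- def getFieldLoc(fields):
--     loc = None
--     for v in fields:
--         vs = v.split(':')
--         if len(vs) == 2 and vs[0] == 'centers':
--             if loc is None: loc = 'centers'
--             elif loc != 'centers': raise ValueError("probe: fields must have the same loc.")
--         else:
--             if loc is None: loc = 'nodes'
--             elif loc != 'nodes': raise ValueError("probe: fields must have the same loc.")
--     return loc
-- ===== SOURCE B (Python) =====
-- def getFieldLoc(fields):
--     def classify(v):
--         vs = v.split(':')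
--         return 'centers' if len(vs) == 2 and vs[0] == 'centers' else 'nodes'
--     locs = {classify(v) for v in fields}
--     if len(locs) > 1:
--         raise ValueError("probe: fields must have the same loc.")
--     return next(iter(locs), None)
-- ===== Notes on version B (the rewrite author's own statement) =====
-- stated objective: simpler
-- what changed: Two-phase rewrite: classify every field into 'centers'/'nodes' with a helper, collect the classifications into a set, and decide uniqueness once at the end, replacing A's incremental Option-state loop with per-state branch checks.
import Mathlib
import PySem

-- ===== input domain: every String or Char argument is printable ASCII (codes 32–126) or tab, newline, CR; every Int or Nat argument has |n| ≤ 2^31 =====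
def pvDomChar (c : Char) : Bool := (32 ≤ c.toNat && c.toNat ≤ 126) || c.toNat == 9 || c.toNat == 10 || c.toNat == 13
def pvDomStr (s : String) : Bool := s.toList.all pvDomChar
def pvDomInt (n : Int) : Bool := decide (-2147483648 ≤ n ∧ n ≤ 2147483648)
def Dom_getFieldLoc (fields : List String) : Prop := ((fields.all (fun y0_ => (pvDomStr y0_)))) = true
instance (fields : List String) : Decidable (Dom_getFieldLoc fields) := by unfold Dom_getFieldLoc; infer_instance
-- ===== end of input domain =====

-- ===== PORT A =====
-- B changes the decomposition (classify-all then single uniqueness check) for simplicity; same values on Pre_.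
-- A raises ValueError on mixed-location field lists; Pre_ excludes exactly those inputs (both programs raise there).
-- loop of A: state is the running loc; 'none' result = ValueError raised
def loopA : List String → Option String → Option (Option String)
  | [], loc => some loc
  | v :: rest, loc =>
    let vs := (PySem.Str.split? v ":").getD []
    if vs.length = 2 ∧ vs.headD "" = "centers" then
      match loc with
      | none => loopA rest (some "centers")
      | some l => if l ≠ "centers" then none else loopA rest (some l)
    else
      match loc with
      | none => loopA rest (some "nodes")
      | some l => if l ≠ "nodes" then none else loopA rest (some l)

def getFieldLoc (fields : List String) : Option String :=
  (loopA fields none).getD none   -- the 'none' (raise) branch lies outside Pre_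

-- ===== PORT B =====
def classifyB (v : String) : String :=
  let vs := (PySem.Str.split? v ":").getD []
  if vs.length = 2 ∧ vs.headD "" = "centers" then "centers" else "nodes"

def getFieldLoc_alt (fields : List String) : Option String :=
  let locs : PySem.Set String := PySem.Set.ofList (fields.map classifyB)
  if locs.length > 1 then none   -- ValueError; outside Pre_
  else locs.head?                -- next(iter(locs), None): set has ≤ 1 element here, order-independent

-- ===== PRECONDITION & SPEC =====
-- a field counts as 'centers' iff splitting on ':' gives exactly two parts with first part 'centers'
def isCentersB (v : String) : Bool :=
  decide (((PySem.Str.split? v ":").getD []).length = 2 ∧ ((PySem.Str.split? v ":").getD []).headD "" = "centers")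

-- Pre_ admits exactly the homogeneous field lists; on mixed lists A raises ValueError (and B raises too).
def Pre_getFieldLoc (fields : List String) : Prop :=
  (∀ v ∈ fields, isCentersB v = true) ∨ (∀ v ∈ fields, ¬ isCentersB v = true)

instance (fields : List String) : Decidable (Pre_getFieldLoc fields) := by
  unfold Pre_getFieldLoc; infer_instance

def pvWitness_getFieldLoc : List String := ["centers:Density", "centers:F"]


def Spec_getFieldLoc (fields : List String) (out : Option String) : Prop := out = getFieldLoc_alt fields
instance (fields : List String) (out : Option String) : Decidable (Spec_getFieldLoc fields out) := by unfold Spec_getFieldLoc; infer_instance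

-- ===== CLAIM (what is proved, stated in full; the proofs are below) =====
def Claim_equal_getFieldLoc : Prop := ∀ (fields : List String), Dom_getFieldLoc fields → Pre_getFieldLoc fields → Spec_getFieldLoc fields (getFieldLoc fields)

-- ===== LEMMAS AND PROOFS =====
theorem classifyB_centers {v : String} (h : isCentersB v = true) : classifyB v = "centers" := by
  unfold isCentersB at h
  simp only [classifyB]
  rw [if_pos (of_decide_eq_true h)]

theorem classifyB_nodes {v : String} (h : ¬ isCentersB v = true) : classifyB v = "nodes" := by
  unfold isCentersB at h
  simp only [classifyB]
  rw [if_neg (fun hp => h (decide_eq_true hp))]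

theorem loopA_homog (l : List String) (s : String)
    (h : ∀ v ∈ l, classifyB v = s) : loopA l (some s) = some (some s) := by
  induction l with
  | nil => rfl
  | cons v rest ih =>
    have hv := h v (by simp)
    have hres := ih (fun w hw => h w (by simp [hw]))
    simp only [classifyB] at hv
    simp only [loopA]
    split
    · rename_i hc
      rw [if_pos hc] at hv
      subst hv
      simpa using hres
    · rename_i hc
      rw [if_neg hc] at hv
      subst hv
      simpa using hres

theorem getFieldLoc_homog (v : String) (rest : List String) (s : String)
    (h : ∀ w ∈ v :: rest, classifyB w = s) :
    getFieldLoc (v :: rest) = some s := by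
  have hv := h v (by simp)
  have hrest := loopA_homog rest s (fun w hw => h w (by simp [hw]))
  simp only [classifyB] at hv
  simp only [getFieldLoc, loopA]
  split
  · rename_i hc; rw [if_pos hc] at hv; subst hv; rw [hrest]; rfl
  · rename_i hc; rw [if_neg hc] at hv; subst hv; rw [hrest]; rfl

theorem ofList_replicate (s : String) (n : Nat) :
    PySem.Set.ofList (List.replicate (n + 1) s) = [s] := by
  induction n with
  | zero => simp [PySem.Set.ofList_eq_foldl, PySem.Set.add]
  | succ m ih =>
    rw [List.replicate_succ']
    rw [PySem.Set.ofList_eq_foldl, List.foldl_append, ← PySem.Set.ofList_eq_foldl, ih]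
    simp [PySem.Set.add, PySem.Set.contains]

theorem ofList_const (l : List String) (s : String)
    (h : ∀ v ∈ l, classifyB v = s) (hnn : l ≠ []) :
    PySem.Set.ofList (l.map classifyB) = [s] := by
  have h2 : ∀ b ∈ l.map classifyB, b = s := by
    intro x hx
    obtain ⟨v, hv, rfl⟩ := List.mem_map.mp hx
    exact h v hv
  have h3 := List.eq_replicate_of_mem h2
  rw [h3]
  simp only [List.length_map]
  obtain ⟨n, hn⟩ : ∃ n, l.length = n + 1 := by
    cases l with
    | nil => exact absurd rfl hnn
    | cons a t => exact ⟨t.length, rfl⟩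
  rw [hn, ofList_replicate]

theorem equal_homog (fields : List String) (s : String)
    (h : ∀ v ∈ fields, classifyB v = s) :
    getFieldLoc fields = getFieldLoc_alt fields := by
  cases fields with
  | nil => simp [getFieldLoc, getFieldLoc_alt, loopA, PySem.Set.ofList]
  | cons v rest =>
    rw [getFieldLoc_homog v rest s h]
    simp only [getFieldLoc_alt]
    rw [ofList_const (v :: rest) s h (by simp)]
    rfl

-- ===== VERDICT (by name: the statement is the Claim_ definition above) =====
theorem getFieldLoc_spec : Claim_equal_getFieldLoc := by
  intro fields _ hpre
  show getFieldLoc fields = getFieldLoc_alt fields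
  rcases hpre with h | h
  · exact equal_homog fields "centers" (fun v hv => classifyB_centers (h v hv))
  · exact equal_homog fields "nodes" (fun v hv => classifyB_nodes (h v hv))
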